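-- pv_equiv track=rewrite | github.com/MorrisMedia/ServantX | servantx-backend/services/claim_adjudication_service.py | split_835_claim_loops
-- ===== SOURCE A (Python) =====
-- from typing import Any, Dict, List, Optional, Tuple
--
-- def _split_segments(raw_text: str) -> List[str]:
--     """Basic X12 segment splitting."""
--     flattened = raw_text.replace("\r", "").replace("\n", "")
--     return [segment.strip() for segment in flattened.split("~") if segment.strip()]
--
-- def split_835_claim_loops(raw_text: str) -> List[str]:
--     """
--     Split an 835 file into individual claim-level EDI strings (one per CLP loop).
--     Reusable by both single-receipt and batch audit paths.
--     """
--     segments = _split_segments(raw_text)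
--     claims: List[List[str]] = []
--     current_claim: List[str] = []
--
--     for segment in segments:
--         if segment.startswith("CLP*"):
--             if current_claim:
--                 claims.append(current_claim)
--                 current_claim = []
--         if segment.startswith("CLP*") or current_claim:
--             current_claim.append(segment)
--
--     if current_claim:
--         claims.append(current_claim)
--
--     return ["~".join(segs) + "~" for segs in claims]
-- ===== SOURCE B (Python) =====
-- from typing import List
--
--
-- def _split_segments(raw_text: str) -> List[str]:
--     """Basic X12 segment splitting."""
--     flattened = raw_text.replace("\r", "").replace("\n", "")
--     return [segment.strip() for segment in flattened.split("~") if segment.strip()]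
--
--
-- def split_835_claim_loops(raw_text: str) -> List[str]:
--     """Index-table-then-slice: find every CLP* position, then slice between
--     consecutive positions (the last slice running to the end)."""
--     segments = _split_segments(raw_text)
--     starts = [i for i, seg in enumerate(segments) if seg.startswith("CLP*")]
--     ends = starts[1:] + [len(segments)]
--     return ["~".join(segments[a:b]) + "~" for a, b in zip(starts, ends)]
-- ===== Notes on version B (the rewrite author's own statement) =====
-- stated objective: alternative
-- what changed: Replaced A's single stateful accumulator loop (flush-current-claim-on-CLP with a trailing flush) by an index table of CLP* positions followed by slicing segments between consecutive positions.
import Mathlib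
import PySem

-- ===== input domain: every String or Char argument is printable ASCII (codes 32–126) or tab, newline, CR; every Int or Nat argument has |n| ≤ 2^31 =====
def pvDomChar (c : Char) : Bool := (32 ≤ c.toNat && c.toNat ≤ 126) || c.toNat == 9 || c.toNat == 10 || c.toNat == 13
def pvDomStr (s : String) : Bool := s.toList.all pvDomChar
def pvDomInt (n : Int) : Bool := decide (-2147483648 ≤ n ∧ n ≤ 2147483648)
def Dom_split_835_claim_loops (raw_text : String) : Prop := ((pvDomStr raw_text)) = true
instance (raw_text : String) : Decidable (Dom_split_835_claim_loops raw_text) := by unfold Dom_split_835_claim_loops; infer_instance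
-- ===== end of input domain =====

-- B replaces A's stateful accumulator loop by an index table of CLP* positions plus slicing (alternative decomposition, same cost).

-- ===== PORT A =====
-- _split_segments: flatten CR/LF, split on '~', strip, drop empties (helper shared verbatim by both Pythons);
-- '~' is a nonempty separator, so Python's str.split never raises and split? is always `some` (getD [] is never taken).
def pvSplitSegments (raw_text : String) : List String :=
  let flattened := PySem.Str.replace (PySem.Str.replace raw_text "\r" "") "\n" ""
  ((((PySem.Str.split? flattened "~").getD [])).filter (fun seg => PySem.Str.strip seg ≠ "")).map
    (fun seg => PySem.Str.strip seg)

def pvIsCLP (s : String) : Bool := PySem.Str.startswith s "CLP*"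

-- one iteration of A's for-loop over the state (claims, current_claim)
def pvStepA (st : List (List String) × List String) (seg : String) :
    List (List String) × List String :=
  let st := if pvIsCLP seg ∧ st.2 ≠ [] then (st.1 ++ [st.2], ([] : List String)) else st
  if pvIsCLP seg ∨ st.2 ≠ [] then (st.1, st.2 ++ [seg]) else st

def split_835_claim_loops (raw_text : String) : List String :=
  let segments := pvSplitSegments raw_text
  let st := segments.foldl pvStepA ([], [])
  let claims := if st.2 ≠ [] then st.1 ++ [st.2] else st.1
  claims.map (fun segs => PySem.Str.join "~" segs ++ "~")

-- ===== PORT B =====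
def split_835_claim_loops_alt (raw_text : String) : List String :=
  let segments := pvSplitSegments raw_text
  let starts := ((PySem.List.enumerate segments 0).filter (fun p => pvIsCLP p.2)).map (·.1)
  let ends := PySem.List.slice starts (some 1) none ++ [(segments.length : Int)]
  (starts.zip ends).map
    (fun p => PySem.Str.join "~" (PySem.List.slice segments (some p.1) (some p.2)) ++ "~")

-- ===== PRECONDITION & SPEC =====
def Spec_split_835_claim_loops (raw_text : String) (out : List String) : Prop := out = split_835_claim_loops_alt raw_text
instance (raw_text : String) (out : List String) : Decidable (Spec_split_835_claim_loops raw_text out) := by unfold Spec_split_835_claim_loops; infer_instance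

-- ===== CLAIM (what is proved, stated in full; the proofs are below) =====
def Claim_equal_split_835_claim_loops : Prop := ∀ (raw_text : String), Dom_split_835_claim_loops raw_text → Spec_split_835_claim_loops raw_text (split_835_claim_loops raw_text)

-- ===== LEMMAS AND PROOFS =====

-- reference grouping: the list of claim groups, one per CLP* segment
def pvChop : List String → List (List String)
  | [] => []
  | s :: t =>
    if pvIsCLP s then
      (s :: t.takeWhile (fun x => !pvIsCLP x)) :: pvChop (t.dropWhile (fun x => !pvIsCLP x))
    else pvChop t
termination_by l => l.length
decreasing_by
  · have := List.length_dropWhile_le (p := fun x => !pvIsCLP x) (l := t); simp; omega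
  · simp

-- Nat positions of the CLP* segments
def pvStartsN : List String → List Nat
  | [] => []
  | s :: t => if pvIsCLP s then 0 :: (pvStartsN t).map (· + 1) else (pvStartsN t).map (· + 1)

lemma pvStartsN_cons_pos (s : String) (t : List String) (hs : pvIsCLP s = true) :
    pvStartsN (s :: t) = 0 :: (pvStartsN t).map (· + 1) := by simp [pvStartsN, hs]

lemma pvStartsN_cons_neg (s : String) (t : List String) (hs : ¬pvIsCLP s = true) :
    pvStartsN (s :: t) = (pvStartsN t).map (· + 1) := by simp [pvStartsN, hs]

def pvGroups (segs : List String) (ps : List (Nat × Nat)) : List (List String) :=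
  ps.map (fun p => (segs.drop p.1).take (p.2 - p.1))

def pvSliceGroups (segs : List String) : List (List String) :=
  pvGroups segs ((pvStartsN segs).zip ((pvStartsN segs).tail ++ [segs.length]))

-- B's port, expressed over an already-split segment list
def pvAltOn (segs : List String) : List String :=
  ((((PySem.List.enumerate segs 0).filter (fun p => pvIsCLP p.2)).map (·.1)).zip
      (PySem.List.slice (((PySem.List.enumerate segs 0).filter (fun p => pvIsCLP p.2)).map (·.1))
          (some 1) none ++ [(segs.length : Int)])).map
    (fun p => PySem.Str.join "~" (PySem.List.slice segs (some p.1) (some p.2)) ++ "~")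

lemma pvGroups_cons (segs : List String) (p : Nat × Nat) (ps : List (Nat × Nat)) :
    pvGroups segs (p :: ps) = ((segs.drop p.1).take (p.2 - p.1)) :: pvGroups segs ps := rfl

-- ---------- A side: the accumulator loop computes pvChop ----------
def pvFinalA (claims : List (List String)) (cur : List String) (segs : List String) :
    List (List String) :=
  let st := segs.foldl pvStepA (claims, cur)
  if st.2 ≠ [] then st.1 ++ [st.2] else st.1

lemma pvFinalA_cons (claims : List (List String)) (cur : List String) (s : String)
    (t : List String) :
    pvFinalA claims cur (s :: t) =
      pvFinalA (pvStepA (claims, cur) s).1 (pvStepA (claims, cur) s).2 t := rfl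

lemma pvFinalA_inside (segs : List String) : ∀ (claims : List (List String))
    (cur : List String), cur ≠ [] →
    pvFinalA claims cur segs =
      claims ++ (cur ++ segs.takeWhile (fun x => !pvIsCLP x)) ::
        pvChop (segs.dropWhile (fun x => !pvIsCLP x)) := by
  induction segs with
  | nil => intro claims cur h; simp [pvFinalA, h, pvChop]
  | cons s t ih =>
    intro claims cur h
    rw [pvFinalA_cons]
    by_cases hs : pvIsCLP s
    · have hstep : pvStepA (claims, cur) s = (claims ++ [cur], [s]) := by
        simp [pvStepA, hs, h]
      rw [hstep]
      rw [ih _ [s] (by simp)]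
      simp [List.takeWhile, List.dropWhile, hs, pvChop]
    · have hstep : pvStepA (claims, cur) s = (claims, cur ++ [s]) := by
        simp [pvStepA, hs, h]
      rw [hstep]
      rw [ih _ (cur ++ [s]) (by simp)]
      simp [List.takeWhile, List.dropWhile, hs]

lemma pvFinalA_outside (segs : List String) : ∀ (claims : List (List String)),
    pvFinalA claims [] segs = claims ++ pvChop segs := by
  induction segs with
  | nil => intro claims; simp [pvFinalA, pvChop]
  | cons s t ih =>
    intro claims
    rw [pvFinalA_cons]
    by_cases hs : pvIsCLP s
    · have hstep : pvStepA (claims, ([] : List String)) s = (claims, [s]) := by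
        simp [pvStepA, hs]
      rw [hstep, pvFinalA_inside t _ [s] (by simp)]
      rw [pvChop]
      simp [hs]
    · have hstep : pvStepA (claims, ([] : List String)) s = (claims, []) := by
        simp [pvStepA, hs]
      rw [hstep, ih]
      rw [pvChop]
      simp [hs]

-- ---------- B side: the index-table slices compute pvChop ----------
lemma pvStartsN_nil_takeWhile (t : List String) (h : pvStartsN t = []) :
    t.takeWhile (fun x => !pvIsCLP x) = t := by
  induction t with
  | nil => rfl
  | cons s t ih =>
    by_cases hs : pvIsCLP s
    · rw [pvStartsN_cons_pos s t hs] at h; exact absurd h (by simp)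
    · rw [pvStartsN_cons_neg s t hs, List.map_eq_nil_iff] at h
      simp [List.takeWhile, hs, ih h]

lemma pvStartsN_head_takeWhile (t : List String) (k : Nat) (rest : List Nat)
    (h : pvStartsN t = k :: rest) : t.take k = t.takeWhile (fun x => !pvIsCLP x) := by
  induction t generalizing k rest with
  | nil => simp [pvStartsN] at h
  | cons s t ih =>
    by_cases hs : pvIsCLP s
    · rw [pvStartsN_cons_pos s t hs] at h
      cases h
      simp [List.takeWhile, hs]
    · rw [pvStartsN_cons_neg s t hs] at h
      cases ht : pvStartsN t with
      | nil => rw [ht] at h; simp at h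
      | cons k' rest' =>
        rw [ht] at h
        simp only [List.map_cons, List.cons.injEq] at h
        obtain ⟨hk, -⟩ := h
        simp [List.takeWhile, hs, ← hk, List.take_succ_cons, ih k' rest' ht]

lemma pvChop_dropWhile (t : List String) :
    pvChop (t.dropWhile (fun x => !pvIsCLP x)) = pvChop t := by
  induction t with
  | nil => rfl
  | cons s t ih =>
    by_cases hs : pvIsCLP s
    · simp [List.dropWhile, hs]
    · rw [show pvChop (s :: t) = pvChop t by rw [pvChop]; simp [hs]]
      simp only [List.dropWhile, hs]
      simpa using ih

lemma pvGroups_shift (s : String) (t : List String) (ps : List (Nat × Nat)) :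
    pvGroups (s :: t) (ps.map (fun p => (p.1 + 1, p.2 + 1))) = pvGroups t ps := by
  simp only [pvGroups, List.map_map]
  apply List.map_congr_left
  intro p _
  simp

lemma pvShiftZip (l : List Nat) (n : Nat) :
    ((l.map (· + 1)).zip ((l.map (· + 1)).tail ++ [n + 1]))
      = (l.zip (l.tail ++ [n])).map (fun p => (p.1 + 1, p.2 + 1)) := by
  rw [← List.map_tail]
  rw [show ((l.tail.map (· + 1)) ++ [n + 1]) = (l.tail ++ [n]).map (· + 1) by simp]
  rw [List.zip_map]
  rfl

lemma pvSliceGroups_eq_chop (segs : List String) : pvSliceGroups segs = pvChop segs := by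
  induction segs with
  | nil => simp [pvSliceGroups, pvGroups, pvStartsN, pvChop]
  | cons s t ih =>
    by_cases hs : pvIsCLP s
    · have hchop : pvChop (s :: t)
          = (s :: t.takeWhile (fun x => !pvIsCLP x)) :: pvChop t := by
        rw [pvChop]
        simp [hs, pvChop_dropWhile]
      rw [hchop, ← ih]
      unfold pvSliceGroups
      rw [pvStartsN_cons_pos s t hs, List.tail_cons]
      cases ht : pvStartsN t with
      | nil =>
        have htw := pvStartsN_nil_takeWhile t ht
        simp [pvGroups, List.take_succ_cons, List.take_length, htw]
      | cons k rest =>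
        have htw := pvStartsN_head_takeWhile t k rest ht
        have hshift := pvShiftZip (k :: rest) t.length
        simp only [List.map_cons, List.tail_cons] at hshift
        simp only [List.length_cons, List.map_cons]
        simp only [List.cons_append, List.zip_cons_cons]
        rw [pvGroups_cons, hshift, pvGroups_shift, List.tail_cons]
        congr 1
        simp [List.take_succ_cons, htw]
    · have hchop : pvChop (s :: t) = pvChop t := by rw [pvChop]; simp [hs]
      rw [hchop, ← ih]
      unfold pvSliceGroups
      rw [pvStartsN_cons_neg s t hs, List.length_cons, pvShiftZip, pvGroups_shift]

-- ---------- linking the ports ----------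
lemma pvStarts_int (segs : List String) : ∀ k : Int,
    (((PySem.List.enumerate segs k).filter (fun p => pvIsCLP p.2)).map (·.1))
      = (pvStartsN segs).map (fun (i : Nat) => k + (i : Int)) := by
  induction segs with
  | nil => intro k; simp [PySem.List.enumerate_nil, pvStartsN]
  | cons s t ih =>
    intro k
    rw [PySem.List.enumerate_cons]
    by_cases hs : pvIsCLP s
    · rw [List.filter_cons_of_pos (by simpa using hs), List.map_cons, ih (k + 1),
        pvStartsN_cons_pos s t hs, List.map_cons, List.map_map]
      simp only [Nat.cast_zero, add_zero]
      congr 1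
      apply List.map_congr_left
      intro i _
      simp only [Function.comp_apply]
      push_cast
      ring
    · rw [List.filter_cons_of_neg (by simpa using hs), ih (k + 1),
        pvStartsN_cons_neg s t hs, List.map_map]
      apply List.map_congr_left
      intro i _
      simp only [Function.comp_apply]
      push_cast
      ring

lemma pvAltOn_eq (segs : List String) :
    pvAltOn segs = (pvSliceGroups segs).map (fun g => PySem.Str.join "~" g ++ "~") := by
  unfold pvAltOn
  have hst : (((PySem.List.enumerate segs 0).filter (fun p => pvIsCLP p.2)).map (·.1))
      = (pvStartsN segs).map (fun (i : Nat) => (i : Int)) := by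
    rw [pvStarts_int segs 0]
    apply List.map_congr_left
    intro i _
    simp
  rw [hst, PySem.List.slice_from_one, ← List.map_tail]
  rw [show (((pvStartsN segs).tail.map (fun (i : Nat) => (i : Int))) ++ [(segs.length : Int)])
        = ((pvStartsN segs).tail ++ [segs.length]).map (fun (i : Nat) => (i : Int)) by simp]
  rw [List.zip_map]
  unfold pvSliceGroups pvGroups
  rw [List.map_map, List.map_map]
  apply List.map_congr_left
  intro p _
  simp only [Function.comp_apply, Prod.map_fst, Prod.map_snd, PySem.List.slice_natCast]

-- ===== VERDICT (by name: the statement is the Claim_ definition above) =====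
theorem split_835_claim_loops_spec : Claim_equal_split_835_claim_loops := by
  intro raw_text _
  unfold Spec_split_835_claim_loops
  rw [show split_835_claim_loops raw_text
        = (pvFinalA [] [] (pvSplitSegments raw_text)).map
            (fun segs => PySem.Str.join "~" segs ++ "~") from rfl]
  rw [show split_835_claim_loops_alt raw_text = pvAltOn (pvSplitSegments raw_text) from rfl]
  rw [pvFinalA_outside, List.nil_append, ← pvSliceGroups_eq_chop, pvAltOn_eq]
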